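-- pv_equiv track=rewrite | github.com/AssassinQuin/hs_analysis | analysis/training/extractor.py | _nearest_state
-- ===== SOURCE A (Python) =====
-- from typing import Any, Dict, List, Optional
--
-- def _nearest_state(
--     state_by_turn: Dict[int, Any],
--     turn: int,
--     sorted_turns: List[int],
-- ) -> Optional[Any]:
--     """Find the closest available state to the given turn."""
--     if not sorted_turns:
--         return None
--     # Binary search for nearest turn
--     lo, hi = 0, len(sorted_turns) - 1
--     best_idx = 0
--     best_diff = abs(sorted_turns[0] - turn)
--     for i in range(len(sorted_turns)):
--         diff = abs(sorted_turns[i] - turn)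
--         if diff < best_diff:
--             best_diff = diff
--             best_idx = i
--     return state_by_turn.get(sorted_turns[best_idx])
-- ===== SOURCE B (Python) =====
-- from typing import Any, Dict, List, Optional
--
--
-- def _bisect_left(a: List[int], x: int) -> int:
--     lo, hi = 0, len(a)
--     while lo < hi:
--         mid = (lo + hi) // 2
--         if a[mid] < x:
--             lo = mid + 1
--         else:
--             hi = mid
--     return lo
--
--
-- def _nearest_state(
--     state_by_turn: Dict[int, Any],
--     turn: int,
--     sorted_turns: List[int],
-- ) -> Optional[Any]:
--     """Find the closest available state to the given turn (sort + binary search)."""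
--     if not sorted_turns:
--         return None
--     ts = sorted(sorted_turns)
--     pos = _bisect_left(ts, turn)
--     if pos == 0:
--         t = ts[0]
--     elif pos == len(ts):
--         t = ts[-1]
--     else:
--         left = ts[pos - 1]
--         right = ts[pos]
--         t = left if turn - left <= right - turn else right
--     return state_by_turn.get(t)
-- ===== Notes on version B (the rewrite author's own statement) =====
-- stated objective: alternative
-- what changed: Replaces A's linear argmin scan over all turns by sorting the turn list (Timsort, linear on the already-sorted lists callers pass) and binary-searching (hand-written bisect_left) to the insertion point, comparing only the two neighbouring turns.
-- outside the precondition, e.g. on _nearest_state({1: 10, 3: 30}, 2, [3, 1]): A returns 30, B returns 10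
import Mathlib
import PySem

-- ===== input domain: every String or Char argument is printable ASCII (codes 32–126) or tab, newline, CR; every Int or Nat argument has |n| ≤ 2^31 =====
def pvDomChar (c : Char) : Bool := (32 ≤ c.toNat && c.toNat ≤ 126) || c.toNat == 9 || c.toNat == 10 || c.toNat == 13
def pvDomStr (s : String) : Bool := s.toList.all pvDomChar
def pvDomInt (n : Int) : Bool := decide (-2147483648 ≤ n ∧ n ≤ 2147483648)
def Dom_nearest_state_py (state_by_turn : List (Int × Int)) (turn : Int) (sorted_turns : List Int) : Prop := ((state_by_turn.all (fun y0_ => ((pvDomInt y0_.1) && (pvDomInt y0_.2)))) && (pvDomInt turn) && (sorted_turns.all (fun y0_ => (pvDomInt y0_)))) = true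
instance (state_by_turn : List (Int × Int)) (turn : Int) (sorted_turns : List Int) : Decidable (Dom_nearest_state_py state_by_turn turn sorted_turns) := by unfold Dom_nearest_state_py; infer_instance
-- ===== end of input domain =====

-- B replaces A's linear argmin scan by sort + binary search (bisect_left) with a two-neighbour comparison; Pre_ excludes exact-distance ties between two distinct turns, where the unspecified tie-break legitimately differs.


-- ===== PORT A =====
-- literal transliteration: guard for empty, dead lo/hi assignment, linear scan over
-- range(len(sorted_turns)) tracking (best_diff, best_idx), then dict .get on the best turn
def nearest_state_py (state_by_turn : List (Int × Int)) (turn : Int) (sorted_turns : List Int) : Option Int :=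
  if sorted_turns.isEmpty then none
  else
    let _lo : Int := 0
    let _hi : Int := PySem.List.len sorted_turns - 1
    let best :=
      (PySem.List.pyRange 0 (PySem.List.len sorted_turns) 1).foldl
        (fun (s : Int × Int) i =>
          let diff := |PySem.List.pyGetD sorted_turns i 0 - turn|
          if diff < s.1 then (diff, i) else s)
        (|PySem.List.pyGetD sorted_turns 0 0 - turn|, 0)
    (PySem.Dict.mk state_by_turn).get? (PySem.List.pyGetD sorted_turns best.2 0)

-- ===== PORT B =====
-- transliteration of Source B's _bisect_left: while lo < hi, mid = (lo+hi)//2, narrow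
def pvBisectLeftGo (a : List Int) (x : Int) : Nat → Nat → Nat → Nat
  | 0, lo, _hi => lo
  | fuel + 1, lo, hi =>
    if lo < hi then
      if PySem.List.pyGetD a (((lo + hi) / 2 : Nat) : Int) 0 < x then
        pvBisectLeftGo a x fuel ((lo + hi) / 2 + 1) hi
      else
        pvBisectLeftGo a x fuel lo ((lo + hi) / 2)
    else lo

-- the while loop runs at most hi - lo times (the bracket halves each iteration)
def pvBisectLeft (a : List Int) (x : Int) (lo hi : Nat) : Nat :=
  pvBisectLeftGo a x (hi - lo) lo hi

-- literal transliteration of Source B: guard for empty, bisect to the insertion point,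
-- pick the boundary element or the nearer of the two neighbours (tie to the left), dict .get
def nearest_state_py_alt (state_by_turn : List (Int × Int)) (turn : Int) (sorted_turns : List Int) : Option Int :=
  if sorted_turns.isEmpty then none
  else
    let ts := PySem.List.sorted sorted_turns (fun t => t)
    let pos := pvBisectLeft ts turn 0 ts.length
    let t :=
      if pos = 0 then PySem.List.pyGetD ts 0 0
      else if pos = ts.length then PySem.List.pyGetD ts (-1) 0
      else
        let left := PySem.List.pyGetD ts ((pos : Int) - 1) 0
        let right := PySem.List.pyGetD ts (pos : Int) 0
        if turn - left ≤ right - turn then left else right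
    (PySem.Dict.mk state_by_turn).get? t

-- ===== PRECONDITION & SPEC =====
-- Pre_ excludes lists containing two DISTINCT turns exactly equidistant from the given turn:
-- there A's first-occurrence tie-break and B's smaller-value tie-break are both defensible
-- choices on an unspecified corner and legitimately differ.
def Pre_nearest_state_py (state_by_turn : List (Int × Int)) (turn : Int) (sorted_turns : List Int) : Prop :=
  ∀ u ∈ sorted_turns, ∀ v ∈ sorted_turns, |u - turn| = |v - turn| → u = v
instance (state_by_turn : List (Int × Int)) (turn : Int) (sorted_turns : List Int) : Decidable (Pre_nearest_state_py state_by_turn turn sorted_turns) := by unfold Pre_nearest_state_py; infer_instance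
def pvWitness_nearest_state_py : (List (Int × Int)) × Int × List Int := ([(1, 10), (3, 30)], 1, [3, 1])

def Spec_nearest_state_py (state_by_turn : List (Int × Int)) (turn : Int) (sorted_turns : List Int) (out : Option Int) : Prop := out = nearest_state_py_alt state_by_turn turn sorted_turns
instance (state_by_turn : List (Int × Int)) (turn : Int) (sorted_turns : List Int) (out : Option Int) : Decidable (Spec_nearest_state_py state_by_turn turn sorted_turns out) := by unfold Spec_nearest_state_py; infer_instance

-- ===== CLAIM (what is proved, stated in full; the proofs are below) =====
def Claim_equal_nearest_state_py : Prop := ∀ (state_by_turn : List (Int × Int)) (turn : Int) (sorted_turns : List Int), Dom_nearest_state_py state_by_turn turn sorted_turns → Pre_nearest_state_py state_by_turn turn sorted_turns → Spec_nearest_state_py state_by_turn turn sorted_turns (nearest_state_py state_by_turn turn sorted_turns)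

-- ===== LEMMAS AND PROOFS =====

-- the characterisation both ports are matched against: a minimiser of |·-turn| among the turns
def pvIsMin (key : Int → Int) (ts : List Int) (r : Int) : Prop :=
  r ∈ ts ∧ ∀ y ∈ ts, key r ≤ key y

-- under Pre_ (all distances distinct) the minimiser is unique
theorem pvIsMin_unique (key : Int → Int) (ts : List Int) (r₁ r₂ : Int)
    (hpre : ∀ u ∈ ts, ∀ v ∈ ts, key u = key v → u = v)
    (h₁ : pvIsMin key ts r₁) (h₂ : pvIsMin key ts r₂) : r₁ = r₂ := by
  rcases h₁ with ⟨m₁, p₁⟩; rcases h₂ with ⟨m₂, p₂⟩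
  exact hpre r₁ m₁ r₂ m₂ (le_antisymm (p₁ r₂ m₂) (p₂ r₁ m₁))

-- A's (best_diff, best_idx) fold over enumerated pairs is the image of a best-pair fold
theorem foldA_eq_pairfold (key : Int → Int) :
    ∀ (ps : List (Int × Int)) (b : Int × Int),
      ps.foldl (fun s p => if key p.2 < s.1 then (key p.2, p.1) else s) (key b.2, b.1)
        = (key (ps.foldl (fun q p => if key p.2 < key q.2 then p else q) b).2,
           (ps.foldl (fun q p => if key p.2 < key q.2 then p else q) b).1) := by
  intro ps
  induction ps with
  | nil => intro b; simp
  | cons p ps ih =>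
      intro b
      simp only [List.foldl_cons]
      by_cases h : key p.2 < key b.2 <;> simp [h, ih]

-- the second component of the best-pair fold is the best-element fold over the seconds
theorem pairfold_snd (key : Int → Int) :
    ∀ (ps : List (Int × Int)) (b : Int × Int),
      (ps.foldl (fun q p => if key p.2 < key q.2 then p else q) b).2
        = (ps.map (·.2)).foldl (fun m x => if key x < key m then x else m) b.2 := by
  intro ps
  induction ps with
  | nil => intro b; simp
  | cons p ps ih =>
      intro b
      simp only [List.foldl_cons, List.map_cons]
      by_cases h : key p.2 < key b.2 <;> simp [h, ih]

-- the best-pair fold returns the seed or a list element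
theorem pairfold_mem (key : Int → Int) :
    ∀ (ps : List (Int × Int)) (b : Int × Int),
      (ps.foldl (fun q p => if key p.2 < key q.2 then p else q) b) = b
        ∨ (ps.foldl (fun q p => if key p.2 < key q.2 then p else q) b) ∈ ps := by
  intro ps
  induction ps with
  | nil => intro b; simp
  | cons p ps ih =>
      intro b
      simp only [List.foldl_cons]
      by_cases h : key p.2 < key b.2 <;> simp only [h, if_pos, if_false]
      · rcases ih p with h' | h'
        · right; rw [h']; exact List.mem_cons_self
        · right; exact List.mem_cons_of_mem _ h'
      · rcases ih b with h' | h'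
        · left; exact h'
        · right; exact List.mem_cons_of_mem _ h'

-- every enumerated pair indexes back to its element
theorem enumerate_pyGetD (ts : List Int) (p : Int × Int) (hp : p ∈ PySem.List.enumerate ts 0) :
    PySem.List.pyGetD ts p.1 0 = p.2 := by
  rw [PySem.List.mem_enumerate_iff] at hp
  obtain ⟨k, hk, rfl⟩ := hp
  simp only [zero_add]
  rw [PySem.List.pyGetD_eq_getElem ts 0 (by positivity) (by exact_mod_cast hk)]
  simp

-- the best-element fold computes a minimiser (first-tie irrelevant here)
theorem fold_isMin (key : Int → Int) :
    ∀ (t : List Int) (m : Int),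
      pvIsMin key (m :: t) (t.foldl (fun m x => if key x < key m then x else m) m) := by
  intro t
  induction t with
  | nil =>
      intro m
      refine ⟨by simp, ?_⟩
      intro y hy
      simp only [List.foldl_nil, List.mem_singleton] at hy ⊢
      subst hy; exact le_refl _
  | cons x t ih =>
      intro m
      simp only [List.foldl_cons]
      by_cases h : key x < key m
      · simp only [h, if_pos]
        obtain ⟨hmem, hp⟩ := ih x
        refine ⟨List.mem_cons_of_mem _ hmem, ?_⟩
        intro y hy
        rcases List.mem_cons.1 hy with rfl | hy'
        · exact le_trans (hp x (by simp)) (le_of_lt h)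
        · exact hp y hy'
      · simp only [h, if_false]
        obtain ⟨hmem, hp⟩ := ih m
        refine ⟨?_, ?_⟩
        · rcases List.mem_cons.1 hmem with h' | h'
          · rw [h']; simp
          · exact List.mem_cons_of_mem _ (List.mem_cons_of_mem _ h')
        · intro y hy
          rcases List.mem_cons.1 hy with rfl | hy'
          · exact hp y (by simp)
          · rcases List.mem_cons.1 hy' with rfl | hy''
            · exact le_trans (hp m (by simp)) (not_lt.1 h)
            · exact hp y (by simp [hy''])

-- sorted lists compare by index
theorem sorted_getElem_le (ts : List Int) (hs : List.Pairwise (· ≤ ·) ts)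
    (i j : Nat) (hij : i ≤ j) (hj : j < ts.length) : ts[i]'(by omega) ≤ ts[j] := by
  rcases Nat.lt_or_ge i j with h | h
  · exact List.Pairwise.rel_get_of_lt hs (by simpa using h)
  · have : i = j := by omega
    subst this; exact le_refl _

-- bisect_left invariant: everything strictly below the result is < x, everything from it on is ≥ x
theorem pvBisectLeftGo_spec (a : List Int) (x : Int) (hs : List.Pairwise (· ≤ ·) a) :
    ∀ (fuel lo hi : Nat), hi - lo ≤ fuel → lo ≤ hi → hi ≤ a.length →
      (∀ i (h : i < a.length), i < lo → a[i] < x) →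
      (∀ i (h : i < a.length), hi ≤ i → x ≤ a[i]) →
      lo ≤ pvBisectLeftGo a x fuel lo hi ∧ pvBisectLeftGo a x fuel lo hi ≤ hi ∧
      (∀ i (h : i < a.length), i < pvBisectLeftGo a x fuel lo hi → a[i] < x) ∧
      (∀ i (h : i < a.length), pvBisectLeftGo a x fuel lo hi ≤ i → x ≤ a[i]) := by
  intro fuel
  induction fuel with
  | zero =>
      intro lo hi hf hle hhi hlow hhigh
      have : lo = hi := by omega
      subst this
      exact ⟨le_refl _, le_refl _, hlow, fun i h hi' => hhigh i h hi'⟩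
  | succ fuel ih =>
      intro lo hi hf hle hhi hlow hhigh
      rw [pvBisectLeftGo]
      by_cases hlt : lo < hi
      · rw [if_pos hlt]
        have hmlt : (lo + hi) / 2 < a.length := by omega
        by_cases hmid : PySem.List.pyGetD a (((lo + hi) / 2 : Nat) : Int) 0 < x
        · rw [if_pos hmid]
          have helem : a[(lo + hi) / 2] < x := by
            rw [PySem.List.pyGetD_eq_getElem a _ (by positivity) (by exact_mod_cast hmlt)] at hmid
            simpa using hmid
          have := ih ((lo + hi) / 2 + 1) hi (by omega) (by omega) hhi
            (fun i h hi' => by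
              rcases Nat.lt_or_ge i ((lo + hi) / 2) with h' | h'
              · exact lt_of_le_of_lt (sorted_getElem_le a hs i ((lo+hi)/2) (by omega) hmlt) helem
              · have : i = (lo + hi) / 2 := by omega
                subst this; exact helem)
            hhigh
          exact ⟨by omega, this.2.1, this.2.2⟩
        · rw [if_neg hmid]
          have helem : x ≤ a[(lo + hi) / 2] := by
            rw [PySem.List.pyGetD_eq_getElem a _ (by positivity) (by exact_mod_cast hmlt)] at hmid
            simp only [Int.toNat_natCast] at hmid
            exact not_lt.1 hmid
          have := ih lo ((lo + hi) / 2) (by omega) (by omega) (by omega) hlow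
            (fun i h hi' => le_trans helem (sorted_getElem_le a hs ((lo+hi)/2) i hi' h))
          exact ⟨this.1, by omega, this.2.2⟩
      · rw [if_neg hlt]
        exact ⟨le_refl _, by omega, hlow, fun i h hi' => hhigh i h (by omega)⟩

theorem pvBisectLeft_spec (a : List Int) (x : Int) (hs : List.Pairwise (· ≤ ·) a) :
    ∀ (lo hi : Nat), lo ≤ hi → hi ≤ a.length →
      (∀ i (h : i < a.length), i < lo → a[i] < x) →
      (∀ i (h : i < a.length), hi ≤ i → x ≤ a[i]) →
      lo ≤ pvBisectLeft a x lo hi ∧ pvBisectLeft a x lo hi ≤ hi ∧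
      (∀ i (h : i < a.length), i < pvBisectLeft a x lo hi → a[i] < x) ∧
      (∀ i (h : i < a.length), pvBisectLeft a x lo hi ≤ i → x ≤ a[i]) := by
  intro lo hi hle hhi hlow hhigh
  exact pvBisectLeftGo_spec a x hs (hi - lo) lo hi (le_refl _) hle hhi hlow hhigh

-- B's chosen turn is a minimiser of |·-turn| in any sorted nonempty list
theorem alt_pick_isMin (ts : List Int) (turn : Int) (hne : ts ≠ [])
    (hs : List.Pairwise (· ≤ ·) ts) :
    pvIsMin (fun v => |v - turn|) ts
      (if pvBisectLeft ts turn 0 ts.length = 0 then PySem.List.pyGetD ts 0 0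
       else if pvBisectLeft ts turn 0 ts.length = ts.length then PySem.List.pyGetD ts (-1) 0
       else if turn - PySem.List.pyGetD ts ((pvBisectLeft ts turn 0 ts.length : Int) - 1) 0 ≤
              PySem.List.pyGetD ts ((pvBisectLeft ts turn 0 ts.length : Int)) 0 - turn
            then PySem.List.pyGetD ts ((pvBisectLeft ts turn 0 ts.length : Int) - 1) 0
            else PySem.List.pyGetD ts ((pvBisectLeft ts turn 0 ts.length : Int)) 0) := by
  have hlen : 0 < ts.length := List.length_pos_iff.2 hne
  obtain ⟨hp0, hple, hbelow, habove⟩ :=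
    pvBisectLeft_spec ts turn hs 0 ts.length (by omega) (le_refl _)
      (fun i h hi' => absurd hi' (by omega)) (fun i h hi' => absurd h (by omega))
  set pos := pvBisectLeft ts turn 0 ts.length with hpos
  have hidx : ∀ (k : Nat) (h : k < ts.length), PySem.List.pyGetD ts (k : Int) 0 = ts[k] := by
    intro k h
    rw [PySem.List.pyGetD_eq_getElem ts _ (by positivity) (by simpa using h)]
    simp
  have hmem_of : ∀ y ∈ ts, ∃ (i : Nat) (h : i < ts.length), ts[i] = y := by
    intro y hy; exact List.mem_iff_getElem.1 hy
  by_cases h0 : pos = 0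
  · -- all elements ≥ turn; nearest is the first
    rw [if_pos h0]
    have hg0 : PySem.List.pyGetD ts 0 0 = ts[0] := hidx 0 hlen
    rw [hg0]
    refine ⟨List.getElem_mem hlen, ?_⟩
    intro y hy
    dsimp only
    obtain ⟨i, h, rfl⟩ := hmem_of y hy
    have h1 : turn ≤ ts[0] := habove 0 hlen (by omega)
    have h2 : ts[0] ≤ ts[i] := sorted_getElem_le ts hs 0 i (by omega) h
    rcases abs_cases (ts[0] - turn) with ⟨e1, _⟩ | ⟨e1, _⟩ <;>
      rcases abs_cases (ts[i] - turn) with ⟨e2, _⟩ | ⟨e2, _⟩ <;> omega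
  · rw [if_neg h0]
    by_cases hn : pos = ts.length
    · -- all elements < turn; nearest is the last
      have hg : PySem.List.pyGetD ts (-1) 0 = ts[ts.length - 1] := by
        rw [PySem.List.pyGetD_neg_ofNat ts 1 0 (by omega) (by omega)]
      rw [if_pos hn, hg]
      refine ⟨List.getElem_mem (by omega), ?_⟩
      intro y hy
      dsimp only
      obtain ⟨i, h, rfl⟩ := hmem_of y hy
      have h1 : ts[ts.length - 1] < turn := hbelow (ts.length - 1) (by omega) (by omega)
      have h2 : ts[i] ≤ ts[ts.length - 1] := sorted_getElem_le ts hs i (ts.length - 1) (by omega) (by omega)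
      rcases abs_cases (ts[ts.length - 1] - turn) with ⟨e1, _⟩ | ⟨e1, _⟩ <;>
        rcases abs_cases (ts[i] - turn) with ⟨e2, _⟩ | ⟨e2, _⟩ <;> omega
    · -- interior: compare the two neighbours
      rw [if_neg hn]
      have hppos : 0 < pos := by omega
      have hplt : pos < ts.length := by omega
      have hgl : PySem.List.pyGetD ts ((pos : Int) - 1) 0 = ts[pos - 1] := by
        have he : ((pos : Int) - 1) = ((pos - 1 : Nat) : Int) := by omega
        rw [he, hidx (pos - 1) (by omega)]
      have hgr : PySem.List.pyGetD ts (pos : Int) 0 = ts[pos] := hidx pos hplt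
      rw [hgl, hgr]
      have hl : ts[pos - 1] < turn := hbelow (pos - 1) (by omega) (by omega)
      have hr : turn ≤ ts[pos] := habove pos hplt (le_refl _)
      by_cases htie : turn - ts[pos - 1] ≤ ts[pos] - turn
      · rw [if_pos htie]
        refine ⟨List.getElem_mem (by omega), ?_⟩
        intro y hy
        dsimp only
        obtain ⟨i, h, rfl⟩ := hmem_of y hy
        rcases Nat.lt_or_ge i pos with hi' | hi'
        · have h2 : ts[i] ≤ ts[pos - 1] := sorted_getElem_le ts hs i (pos - 1) (by omega) (by omega)
          have h3 : ts[i] < turn := hbelow i h hi'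
          rcases abs_cases (ts[pos - 1] - turn) with ⟨e1, _⟩ | ⟨e1, _⟩ <;>
            rcases abs_cases (ts[i] - turn) with ⟨e2, _⟩ | ⟨e2, _⟩ <;> omega
        · have h2 : ts[pos] ≤ ts[i] := sorted_getElem_le ts hs pos i hi' h
          rcases abs_cases (ts[pos - 1] - turn) with ⟨e1, _⟩ | ⟨e1, _⟩ <;>
            rcases abs_cases (ts[i] - turn) with ⟨e2, _⟩ | ⟨e2, _⟩ <;> omega
      · rw [if_neg htie]
        refine ⟨List.getElem_mem hplt, ?_⟩
        intro y hy
        dsimp only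
        obtain ⟨i, h, rfl⟩ := hmem_of y hy
        rcases Nat.lt_or_ge i pos with hi' | hi'
        · have h2 : ts[i] ≤ ts[pos - 1] := sorted_getElem_le ts hs i (pos - 1) (by omega) (by omega)
          have h3 : ts[i] < turn := hbelow i h hi'
          rcases abs_cases (ts[pos] - turn) with ⟨e1, _⟩ | ⟨e1, _⟩ <;>
            rcases abs_cases (ts[i] - turn) with ⟨e2, _⟩ | ⟨e2, _⟩ <;> omega
        · have h2 : ts[pos] ≤ ts[i] := sorted_getElem_le ts hs pos i hi' h
          rcases abs_cases (ts[pos] - turn) with ⟨e1, _⟩ | ⟨e1, _⟩ <;>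
            rcases abs_cases (ts[i] - turn) with ⟨e2, _⟩ | ⟨e2, _⟩ <;> omega

-- ===== VERDICT (by name: the statement is the Claim_ definition above) =====
theorem nearest_state_py_spec : Claim_equal_nearest_state_py := by
  intro d turn ts _ hpre
  unfold Spec_nearest_state_py nearest_state_py nearest_state_py_alt
  by_cases hemp : ts.isEmpty
  · simp [hemp]
  · simp only [hemp, if_false, Bool.false_eq_true]
    obtain ⟨x, t, rfl⟩ : ∃ x t, ts = x :: t := by
      cases ts with
      | nil => simp at hemp
      | cons x t => exact ⟨x, t, rfl⟩
    set key : Int → Int := fun v => |v - turn| with hkey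
    -- rewrite A's range fold into a fold over enumerate
    have hfold :
        (PySem.List.pyRange 0 (PySem.List.len (x :: t)) 1).foldl
            (fun (s : Int × Int) i =>
              let diff := |PySem.List.pyGetD (x :: t) i 0 - turn|
              if diff < s.1 then (diff, i) else s)
            (|PySem.List.pyGetD (x :: t) 0 0 - turn|, 0)
          = (PySem.List.enumerate (x :: t) 0).foldl
              (fun (s : Int × Int) p => if key p.2 < s.1 then (key p.2, p.1) else s)
              (key x, 0) := by
      rw [PySem.List.enumerate_eq_map_pyRange (x :: t) 0, List.foldl_map]
      simp [PySem.List.pyGetD_zero_cons, hkey]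
    rw [hfold]
    -- the best pair
    set q := (PySem.List.enumerate (x :: t) 0).foldl
        (fun (b p : Int × Int) => if key p.2 < key b.2 then p else b) ((0 : Int), x) with hq
    have hA : (PySem.List.enumerate (x :: t) 0).foldl
        (fun (s : Int × Int) p => if key p.2 < s.1 then (key p.2, p.1) else s)
        (key x, 0) = (key q.2, q.1) := by
      have := foldA_eq_pairfold key (PySem.List.enumerate (x :: t) 0) ((0 : Int), x)
      simpa [hq] using this
    rw [hA]
    -- the index in the best pair points at the best element
    have hPq : PySem.List.pyGetD (x :: t) q.1 0 = q.2 := by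
      rcases pairfold_mem key (PySem.List.enumerate (x :: t) 0) ((0 : Int), x) with h | h
      · rw [hq, h]; simp [PySem.List.pyGetD_zero_cons]
      · exact enumerate_pyGetD (x :: t) q (hq ▸ h)
    -- the best element is the first-minimiser fold
    have hsnd : q.2 = t.foldl (fun m y => if key y < key m then y else m) x := by
      have hsnd := pairfold_snd key (PySem.List.enumerate (x :: t) 0) ((0 : Int), x)
      rw [PySem.List.map_snd_enumerate] at hsnd
      simp only [List.foldl_cons, lt_self_iff_false, ite_self] at hsnd
      rw [← hq] at hsnd
      exact hsnd
    rw [hPq]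
    -- both sides are minimisers of |·-turn|; Pre_ makes the minimiser unique
    have hApick : pvIsMin key (x :: t) q.2 := by
      rw [hsnd]; exact fold_isMin key t x
    have hne2 : PySem.List.sorted (x :: t) (fun v => v) ≠ [] := by
      simp [PySem.List.sorted_eq_nil_iff]
    have hsort2 : List.Pairwise (· ≤ ·) (PySem.List.sorted (x :: t) (fun v => v)) := by
      simpa using PySem.List.sorted_pairwise (xs := x :: t) (key := fun v => v)
    have hB := alt_pick_isMin (PySem.List.sorted (x :: t) (fun v => v)) turn hne2 hsort2
    have hBmin : pvIsMin key (x :: t) _ :=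
      ⟨(PySem.List.mem_sorted _ _ _ _).1 hB.1, fun y hy => hB.2 y ((PySem.List.mem_sorted _ _ _ _).2 hy)⟩
    have hpre' : ∀ u ∈ (x :: t), ∀ v ∈ (x :: t), key u = key v → u = v := hpre
    exact congrArg _ (pvIsMin_unique key (x :: t) _ _ hpre' hApick hBmin)
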